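-- pv_equiv track=rewrite | github.com/holbizmetrics/prime-alphabet-finder | prime_encoder_extended.py | polish_number_word
-- ===== SOURCE A (Python) =====
-- def polish_number_word(n: int) -> str:
--     if n == 0: return "zero"
--     ones = ["", "jeden", "dwa", "trzy", "cztery", "piec", "szesc", "siedem", "osiem", "dziewiec",
--             "dziesiec", "jedenascie", "dwanascie", "trzynascie", "czternascie", "pietnascie",
--             "szesnascie", "siedemnascie", "osiemnascie", "dziewietnascie"]
--     tens = ["", "", "dwadziescia", "trzydziesci", "czterdziesci", "piecdziesiat", "szescdziesiat",
--             "siedemdziesiat", "osiemdziesiat", "dziewiecdziesiat"]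
--     if n < 20: return ones[n]
--     elif n < 100:
--         if n % 10 == 0: return tens[n // 10]
--         return tens[n // 10] + " " + ones[n % 10]
--     elif n < 1000:
--         if n // 100 == 1: prefix = "sto"
--         elif n // 100 == 2: prefix = "dwiescie"
--         elif n // 100 in [3,4]: prefix = ones[n // 100] + "sta"
--         else: prefix = ones[n // 100] + "set"
--         return prefix + (" " + polish_number_word(n % 100) if n % 100 else "")
--     return str(n)
-- ===== SOURCE B (Python) =====
-- def polish_number_word(n: int) -> str:
--     if n == 0:
--         return "zero"
--     ones = ["", "jeden", "dwa", "trzy", "cztery", "piec", "szesc", "siedem", "osiem", "dziewiec",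
--             "dziesiec", "jedenascie", "dwanascie", "trzynascie", "czternascie", "pietnascie",
--             "szesnascie", "siedemnascie", "osiemnascie", "dziewietnascie"]
--     tens = ["", "", "dwadziescia", "trzydziesci", "czterdziesci", "piecdziesiat", "szescdziesiat",
--             "siedemdziesiat", "osiemdziesiat", "dziewiecdziesiat"]
--     if n < 0 or n >= 1000:
--         return str(n)
--     parts = []
--     if n >= 100:
--         h = n // 100
--         if h == 1:
--             parts.append("sto")
--         elif h == 2:
--             parts.append("dwiescie")
--         elif h in (3, 4):
--             parts.append(ones[h] + "sta")
--         else: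
--             parts.append(ones[h] + "set")
--         n %= 100
--     if 1 <= n < 20:
--         parts.append(ones[n])
--     elif n >= 20:
--         parts.append(tens[n // 10])
--         if n % 10:
--             parts.append(ones[n % 10])
--     return " ".join(parts)
-- ===== Notes on version B (the rewrite author's own statement) =====
-- stated objective: alternative
-- what changed: Replaces A's one-level recursion for 20..999 by a flat place-value assembly that appends hundreds/tens/ones words to a parts list and returns ' '.join(parts), and returns str(n) for all negative n instead of A's negative-index lookup.
-- intended difference: For negative n still inside the ones table's wraparound range A returns whatever word Python's negative indexing of ones picks (the empty string at the lowest such n), while B returns str(n) -- the same out-of-range fallback A itself uses for large n and the intended value. — e.g. on polish_number_word(-1): A returns "dziewietnascie", B returns "-1"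
import Mathlib
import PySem

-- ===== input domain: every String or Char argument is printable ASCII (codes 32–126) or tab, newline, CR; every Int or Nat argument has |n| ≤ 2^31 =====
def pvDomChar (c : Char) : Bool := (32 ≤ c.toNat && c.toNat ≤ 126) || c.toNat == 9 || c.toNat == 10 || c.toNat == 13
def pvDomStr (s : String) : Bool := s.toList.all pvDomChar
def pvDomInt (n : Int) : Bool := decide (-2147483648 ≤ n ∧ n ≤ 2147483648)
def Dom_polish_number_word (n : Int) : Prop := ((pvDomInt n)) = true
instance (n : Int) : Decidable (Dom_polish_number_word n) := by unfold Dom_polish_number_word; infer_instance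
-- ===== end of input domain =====

-- B replaces A's one-level recursion for 20..999 by a flat place-value parts-list
-- assembly joined with " " (objective: alternative decomposition), and returns str(n)
-- for negative input, where A's ones[n] negative-index wraparound gives an accidental word.

-- ===== PORT A =====
def pvOnesA : List String :=
  ["", "jeden", "dwa", "trzy", "cztery", "piec", "szesc", "siedem", "osiem", "dziewiec",
   "dziesiec", "jedenascie", "dwanascie", "trzynascie", "czternascie", "pietnascie",
   "szesnascie", "siedemnascie", "osiemnascie", "dziewietnascie"]
def pvTensA : List String :=
  ["", "", "dwadziescia", "trzydziesci", "czterdziesci", "piecdziesiat", "szescdziesiat",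
   "siedemdziesiat", "osiemdziesiat", "dziewiecdziesiat"]

def polish_number_word (n : Int) : String :=
  if n = 0 then "zero"
  else if n < 20 then (PySem.List.pyGet? pvOnesA n).getD ""   -- IndexError (= none) excluded by Pre_
  else if _h100 : n < 100 then
    (if PySem.Int.mod n 10 = 0 then (PySem.List.pyGet? pvTensA (PySem.Int.floordiv n 10)).getD ""
     else (PySem.List.pyGet? pvTensA (PySem.Int.floordiv n 10)).getD "" ++ " " ++
          (PySem.List.pyGet? pvOnesA (PySem.Int.mod n 10)).getD "")
  else if n < 1000 then
    (let prefix_ :=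
        if PySem.Int.floordiv n 100 = 1 then "sto"
        else if PySem.Int.floordiv n 100 = 2 then "dwiescie"
        else if PySem.Int.floordiv n 100 = 3 ∨ PySem.Int.floordiv n 100 = 4 then
          (PySem.List.pyGet? pvOnesA (PySem.Int.floordiv n 100)).getD "" ++ "sta"
        else (PySem.List.pyGet? pvOnesA (PySem.Int.floordiv n 100)).getD "" ++ "set"
     prefix_ ++ (if PySem.Int.mod n 100 ≠ 0 then " " ++ polish_number_word (PySem.Int.mod n 100) else ""))
  else PySem.Int.toStr n
termination_by n.toNat
decreasing_by
  have h1 := PySem.Int.mod_nonneg n (b := 100) (by norm_num)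
  have h2 := PySem.Int.mod_lt n (b := 100) (by norm_num)
  omega

-- ===== PORT B =====
def pvOnesB : List String :=
  ["", "jeden", "dwa", "trzy", "cztery", "piec", "szesc", "siedem", "osiem", "dziewiec",
   "dziesiec", "jedenascie", "dwanascie", "trzynascie", "czternascie", "pietnascie",
   "szesnascie", "siedemnascie", "osiemnascie", "dziewietnascie"]
def pvTensB : List String :=
  ["", "", "dwadziescia", "trzydziesci", "czterdziesci", "piecdziesiat", "szescdziesiat",
   "siedemdziesiat", "osiemdziesiat", "dziewiecdziesiat"]
def pvGetB (xs : List String) (i : Int) : String := (PySem.List.pyGet? xs i).getD ""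

def polish_number_word_alt (n : Int) : String :=
  if n = 0 then "zero"
  else if n < 0 ∨ 1000 ≤ n then PySem.Int.toStr n
  else
    -- hundreds place, then n %= 100
    let pm : List String × Int :=
      if 100 ≤ n then
        (( [if PySem.Int.floordiv n 100 = 1 then "sto"
            else if PySem.Int.floordiv n 100 = 2 then "dwiescie"
            else if PySem.Int.floordiv n 100 = 3 ∨ PySem.Int.floordiv n 100 = 4 then
              pvGetB pvOnesB (PySem.Int.floordiv n 100) ++ "sta"
            else pvGetB pvOnesB (PySem.Int.floordiv n 100) ++ "set"] ),
         PySem.Int.mod n 100)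
      else ([], n)
    let parts := pm.1
    let m := pm.2
    let parts :=
      if 1 ≤ m ∧ m < 20 then parts ++ [pvGetB pvOnesB m]
      else if 20 ≤ m then
        let parts := parts ++ [pvGetB pvTensB (PySem.Int.floordiv m 10)]
        if PySem.Int.mod m 10 ≠ 0 then parts ++ [pvGetB pvOnesB (PySem.Int.mod m 10)] else parts
      else parts
    PySem.Str.join " " parts

-- ===== PRECONDITION & SPEC =====
-- Pre_ excludes the negative n below the ones table's wraparound range, where Python A raises IndexError on ones[n].
def Pre_polish_number_word (n : Int) : Prop := -20 ≤ n
instance (n : Int) : Decidable (Pre_polish_number_word n) := by unfold Pre_polish_number_word; infer_instance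
def pvWitness_polish_number_word : Int := 123

-- On negative n inside the ones table's wraparound range A returns the word Python's
-- negative indexing of ones[n] picks; B returns str(n), the intended out-of-range fallback.
def D_polish_number_word (n : Int) : Prop := -20 ≤ n ∧ n < 0
instance (n : Int) : Decidable (D_polish_number_word n) := by unfold D_polish_number_word; infer_instance

def Spec_polish_number_word (n : Int) (out : String) : Prop := ¬ D_polish_number_word n → out = polish_number_word_alt n
instance (n : Int) (out : String) : Decidable (Spec_polish_number_word n out) := by unfold Spec_polish_number_word; infer_instance

def pvDiffWitness_polish_number_word : Int := -1
def pvDiffWitnessOut_polish_number_word : String × String := ("dziewietnascie", "-1")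

-- ===== CLAIM =====
def Claim_unchanged_polish_number_word : Prop := ∀ (n : Int), Dom_polish_number_word n → Pre_polish_number_word n → Spec_polish_number_word n (polish_number_word n)
def Claim_changed_polish_number_word : Prop := Dom_polish_number_word (pvDiffWitness_polish_number_word) ∧ Pre_polish_number_word (pvDiffWitness_polish_number_word) ∧ D_polish_number_word (pvDiffWitness_polish_number_word) ∧ polish_number_word (pvDiffWitness_polish_number_word) = pvDiffWitnessOut_polish_number_word.1 ∧ polish_number_word_alt (pvDiffWitness_polish_number_word) = pvDiffWitnessOut_polish_number_word.2 ∧ pvDiffWitnessOut_polish_number_word.1 ≠ pvDiffWitnessOut_polish_number_word.2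
def Claim_exact_polish_number_word : Prop := ∀ (n : Int), Dom_polish_number_word n → Pre_polish_number_word n → D_polish_number_word n → polish_number_word n ≠ polish_number_word_alt n

-- ===== LEMMAS AND PROOFS =====
theorem pv_join_one (a : String) : PySem.Str.join " " [a] = a := by
  simp [PySem.Str.join, PySem.Chars.join_singleton]
theorem pv_join_two (a b : String) : PySem.Str.join " " [a, b] = a ++ (" " ++ b) := by
  apply String.toList_inj.mp
  simp [PySem.Str.join, PySem.Chars.join, List.intercalate]
theorem pv_join_three (a b c : String) : PySem.Str.join " " [a, b, c] = a ++ (" " ++ (b ++ (" " ++ c))) := by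
  apply String.toList_inj.mp
  simp [PySem.Str.join, PySem.Chars.join, List.intercalate]

theorem pv_A_small (n : Int) (h0 : n ≠ 0) (h : n < 20) :
    polish_number_word n = (PySem.List.pyGet? pvOnesA n).getD "" := by
  rw [polish_number_word]; simp [h0, h]

theorem pv_A_tens (n : Int) (h20 : 20 ≤ n) (h : n < 100) :
    polish_number_word n =
      (if PySem.Int.mod n 10 = 0 then (PySem.List.pyGet? pvTensA (PySem.Int.floordiv n 10)).getD ""
       else (PySem.List.pyGet? pvTensA (PySem.Int.floordiv n 10)).getD "" ++ " " ++
            (PySem.List.pyGet? pvOnesA (PySem.Int.mod n 10)).getD "") := by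
  rw [polish_number_word]
  simp [show n ≠ 0 by omega, show ¬ n < 20 by omega, h]

theorem pv_B_zero : polish_number_word_alt 0 = "zero" := by decide

theorem pv_B_big (n : Int) (h : n < 0 ∨ 1000 ≤ n) (h0 : n ≠ 0) :
    polish_number_word_alt n = PySem.Int.toStr n := by
  simp [polish_number_word_alt, h0, h]

theorem pv_B_small (n : Int) (h1 : 1 ≤ n) (h2 : n < 20) :
    polish_number_word_alt n = pvGetB pvOnesB n := by
  have hx : ¬ (n < 0 ∨ 1000 ≤ n) := by omega
  simp [polish_number_word_alt, show n ≠ 0 by omega, hx, show ¬ (100 ≤ n) by omega,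
        h1, h2, pv_join_one]

theorem pv_B_tens (n : Int) (h1 : 20 ≤ n) (h2 : n < 100) :
    polish_number_word_alt n =
      (if PySem.Int.mod n 10 ≠ 0 then
        PySem.Str.join " " [pvGetB pvTensB (PySem.Int.floordiv n 10), pvGetB pvOnesB (PySem.Int.mod n 10)]
       else PySem.Str.join " " [pvGetB pvTensB (PySem.Int.floordiv n 10)]) := by
  have hx : ¬ (n < 0 ∨ 1000 ≤ n) := by omega
  simp only [polish_number_word_alt, if_neg (show ¬ n = 0 by omega), if_neg hx,
    if_neg (show ¬ (100 ≤ n) by omega)]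
  simp only [if_neg (show ¬ (1 ≤ n ∧ n < 20) by omega), if_pos h1]
  split_ifs <;> simp_all

theorem pv_B_hund (n : Int) (h1 : 100 ≤ n) (h2 : n < 1000) :
    polish_number_word_alt n =
      (let P := if PySem.Int.floordiv n 100 = 1 then "sto"
          else if PySem.Int.floordiv n 100 = 2 then "dwiescie"
          else if PySem.Int.floordiv n 100 = 3 ∨ PySem.Int.floordiv n 100 = 4 then
            pvGetB pvOnesB (PySem.Int.floordiv n 100) ++ "sta"
          else pvGetB pvOnesB (PySem.Int.floordiv n 100) ++ "set"
       let m := PySem.Int.mod n 100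
       if 1 ≤ m ∧ m < 20 then PySem.Str.join " " [P, pvGetB pvOnesB m]
       else if 20 ≤ m then
         (if PySem.Int.mod m 10 ≠ 0 then
            PySem.Str.join " " [P, pvGetB pvTensB (PySem.Int.floordiv m 10), pvGetB pvOnesB (PySem.Int.mod m 10)]
          else PySem.Str.join " " [P, pvGetB pvTensB (PySem.Int.floordiv m 10)])
       else PySem.Str.join " " [P]) := by
  have hx : ¬ (n < 0 ∨ 1000 ≤ n) := by omega
  simp only [polish_number_word_alt, if_neg (show ¬ n = 0 by omega), if_neg hx, if_pos h1]
  split_ifs <;> simp_all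

theorem pv_lists_eq : pvOnesB = pvOnesA ∧ pvTensB = pvTensA := ⟨rfl, rfl⟩

theorem pv_main_hund (n : Int) (h1 : 100 ≤ n) (h2 : n < 1000) :
    polish_number_word n = polish_number_word_alt n := by
  have hm0 : 0 ≤ PySem.Int.mod n 100 := PySem.Int.mod_nonneg n (by norm_num)
  have hm1 : PySem.Int.mod n 100 < 100 := PySem.Int.mod_lt n (by norm_num)
  rw [polish_number_word]
  simp only [if_neg (show ¬ n = 0 by omega), if_neg (show ¬ n < 20 by omega),
    dif_neg (show ¬ n < 100 by omega), if_pos h2]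
  rw [pv_B_hund n h1 h2]
  simp only [pvGetB, pv_lists_eq.1, pv_lists_eq.2]
  set P := (if PySem.Int.floordiv n 100 = 1 then "sto"
      else if PySem.Int.floordiv n 100 = 2 then "dwiescie"
      else if PySem.Int.floordiv n 100 = 3 ∨ PySem.Int.floordiv n 100 = 4 then
        (PySem.List.pyGet? pvOnesA (PySem.Int.floordiv n 100)).getD "" ++ "sta"
      else (PySem.List.pyGet? pvOnesA (PySem.Int.floordiv n 100)).getD "" ++ "set") with hP
  set m := PySem.Int.mod n 100 with hm
  rcases (show m = 0 ∨ (1 ≤ m ∧ m < 20) ∨ 20 ≤ m by omega) with h | h | h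
  · simp [h, pv_join_one]
  · rw [if_pos h, if_pos (show m ≠ 0 by omega), pv_A_small m (by omega) h.2,
      pv_join_two]
  · rw [if_neg (show ¬ (1 ≤ m ∧ m < 20) by omega), if_pos h,
      if_pos (show m ≠ 0 by omega), pv_A_tens m h (by omega)]
    rcases eq_or_ne (PySem.Int.mod m 10) 0 with hr | hr
    · rw [if_pos hr, if_neg (fun hc => hc hr), pv_join_two]
    · rw [if_neg hr, if_pos hr, pv_join_three, String.append_assoc]

theorem pv_main (n : Int) (hn0 : 0 ≤ n) :
    polish_number_word n = polish_number_word_alt n := by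
  rcases (show n = 0 ∨ (1 ≤ n ∧ n < 20) ∨ (20 ≤ n ∧ n < 100) ∨ (100 ≤ n ∧ n < 1000) ∨ 1000 ≤ n
    by omega) with rfl | h | h | h | h
  · rw [polish_number_word]; simp [pv_B_zero]
  · rw [pv_A_small n (by omega) h.2, pv_B_small n h.1 h.2]
    simp [pvGetB, pv_lists_eq.1]
  · rw [pv_A_tens n h.1 h.2, pv_B_tens n h.1 h.2]
    simp only [pvGetB, pv_lists_eq.1, pv_lists_eq.2]
    rcases eq_or_ne (PySem.Int.mod n 10) 0 with hr | hr
    · rw [if_pos hr, if_neg (fun hc => hc hr), pv_join_one]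
    · rw [if_neg hr, if_pos hr, pv_join_two, String.append_assoc]
  · exact pv_main_hund n h.1 h.2
  · rw [polish_number_word]
    simp only [if_neg (show ¬ n = 0 by omega), if_neg (show ¬ n < 20 by omega),
      dif_neg (show ¬ n < 100 by omega), if_neg (show ¬ n < 1000 by omega)]
    rw [pv_B_big n (Or.inr h) (by omega)]

-- ===== VERDICT =====
theorem polish_number_word_spec : Claim_unchanged_polish_number_word := by
  intro n hdom hpre
  unfold Spec_polish_number_word
  intro hnd
  have hn0 : 0 ≤ n := by
    unfold Pre_polish_number_word at hpre
    unfold D_polish_number_word at hnd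
    omega
  exact pv_main n hn0

theorem polish_number_word_changed : Claim_changed_polish_number_word := by
  unfold Claim_changed_polish_number_word
  refine ⟨by decide, by decide, by decide, ?_, by decide, by decide⟩
  show polish_number_word (-1) = "dziewietnascie"
  rw [pv_A_small (-1) (by decide) (by decide)]
  decide

theorem polish_number_word_tight : Claim_exact_polish_number_word := by
  unfold Claim_exact_polish_number_word
  intro n _ _ hd
  unfold D_polish_number_word at hd
  rw [pv_A_small n (by omega) (by omega), pv_B_big n (Or.inl hd.2) (by omega)]
  obtain ⟨ha, hb⟩ := hd
  interval_cases n <;> decide
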